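-- pv_equiv track=rewrite | github.com/Evergreenies/algorithms | python_algorithms/daily_coding_problem/01287_compute_bonuses.py | compute_bonuses
-- ===== SOURCE A (Python) =====
-- def compute_bonuses(arr: list[int]) -> list[int]:
--     length = len(arr)
--     bonuses = [1] * length
--
--     # iterate from left to right
--     # ensuring increasing bonuses for increasing line of code
--     for index in range(1, length):
--         if arr[index] > arr[index - 1]:
--             bonuses[index] = bonuses[index - 1] + 1
--
--     # iterate from right to left
--     for index in range(length - 2, -1, -1):
--         if arr[index] > arr[index + 1]:
--             bonuses[index] = max(bonuses[index], bonuses[index + 1] + 1)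
--
--     return bonuses
-- ===== SOURCE B (Python) =====
-- def compute_bonuses(arr: list[int]) -> list[int]:
--     n = len(arr)
--     out = []
--     up = 1
--     i = 0
--     while i < n:
--         if i > 0:
--             up = up + 1 if arr[i] > arr[i - 1] else 1
--         j = i
--         while j + 1 < n and arr[j + 1] < arr[j]:
--             j += 1
--         d = j - i  # length of the strict descent starting right after i
--         if d > 0:
--             out.append(max(up, d + 1))
--             out.extend(range(d, 0, -1))
--             i = j + 1
--             up = 1
--         else:
--             out.append(up)
--             i += 1
--     return out
-- ===== Notes on version B (the rewrite author's own statement) =====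
-- stated objective: alternative
-- what changed: Replaces A's two directional sweeps over a mutable array (left-to-right increase pass, then right-to-left max pass) by a single run-decomposition scan: one forward loop that looks ahead to measure each strict descent, emits the peak as max(ascending-run,descent+1), emits the descent values d..1 back-to-front in one step, and otherwise emits the current ascending-run counter.
import Mathlib
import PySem

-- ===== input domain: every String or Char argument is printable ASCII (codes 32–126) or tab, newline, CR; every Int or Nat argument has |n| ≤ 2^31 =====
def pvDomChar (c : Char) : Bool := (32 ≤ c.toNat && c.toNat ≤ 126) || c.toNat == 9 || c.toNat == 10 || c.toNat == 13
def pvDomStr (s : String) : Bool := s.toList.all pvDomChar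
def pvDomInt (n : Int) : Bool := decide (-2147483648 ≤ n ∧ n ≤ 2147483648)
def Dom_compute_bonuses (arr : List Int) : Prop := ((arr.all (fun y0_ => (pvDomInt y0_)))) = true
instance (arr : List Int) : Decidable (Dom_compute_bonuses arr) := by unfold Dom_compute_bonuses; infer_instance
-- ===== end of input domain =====

-- B replaces A's two directional sweeps over a mutable array by a single forward
-- run-decomposition scan that looks ahead over each strict descent (objective: alternative; same O(n) cost).

-- ===== PORT A =====
-- list indexing; every index A uses lies in range, so the default is never returned
def pvGet (xs : List Int) (i : Nat) : Int := xs.getD i 0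

-- 'for index in range(1, length)' of A, as recursion counting index up to length
def loop1A (arr : List Int) (bonuses : List Int) (index : Nat) : List Int :=
  if index < arr.length then
    loop1A arr
      (if pvGet arr index > pvGet arr (index - 1) then
        bonuses.set index (pvGet bonuses (index - 1) + 1)
      else bonuses) (index + 1)
  else bonuses
termination_by arr.length - index

-- 'for index in range(length - 2, -1, -1)' of A; argument k = index + 1 counts down
def loop2A (arr : List Int) (bonuses : List Int) : Nat → List Int
  | 0 => bonuses
  | k + 1 =>
    loop2A arr
      (if pvGet arr k > pvGet arr (k + 1) then
        bonuses.set k (max (pvGet bonuses k) (pvGet bonuses (k + 1) + 1))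
      else bonuses) k

def compute_bonuses (arr : List Int) : List Int :=
  loop2A arr (loop1A arr (List.replicate arr.length 1) 1) (arr.length - 1)

-- ===== PORT B =====
-- inner 'while j + 1 < n and arr[j+1] < arr[j]' of Source B: length j - i of the strict descent after i
def descLen (arr : List Int) (j : Nat) : Nat :=
  if _h : j + 1 < arr.length ∧ pvGet arr (j + 1) < pvGet arr j then descLen arr (j + 1) + 1 else 0
termination_by arr.length - j

-- 'out.extend(range(d, 0, -1))' of Source B: the list d, d-1, …, 1
def downList : Nat → List Int
  | 0 => []
  | k + 1 => ((k : Int) + 1) :: downList k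

-- 'up = up + 1 if arr[i] > arr[i-1] else 1' guarded by 'if i > 0' of Source B
def upStep (arr : List Int) (i : Nat) (up : Int) : Int :=
  if 0 < i then (if pvGet arr i > pvGet arr (i - 1) then up + 1 else 1) else up

-- outer 'while i < n' of Source B; out is produced by the recursion, up is the ascending-run counter
def loopB (arr : List Int) (i : Nat) (up : Int) : List Int :=
  if _hi : i < arr.length then
    if _hd : 0 < descLen arr i then
      (max (upStep arr i up) ((descLen arr i : Int) + 1)) ::
        (downList (descLen arr i) ++ loopB arr (i + descLen arr i + 1) 1)
    else
      upStep arr i up :: loopB arr (i + 1) (upStep arr i up)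
  else []
termination_by arr.length - i
decreasing_by all_goals omega

def compute_bonuses_alt (arr : List Int) : List Int := loopB arr 0 1

-- ===== PRECONDITION & SPEC =====
def Spec_compute_bonuses (arr : List Int) (out : List Int) : Prop := out = compute_bonuses_alt arr
instance (arr : List Int) (out : List Int) : Decidable (Spec_compute_bonuses arr out) := by unfold Spec_compute_bonuses; infer_instance

-- ===== CLAIM (what is proved, stated in full; the proofs are below) =====
def Claim_equal_compute_bonuses : Prop := ∀ (arr : List Int), Dom_compute_bonuses arr → Spec_compute_bonuses arr (compute_bonuses arr)

-- ===== LEMMAS AND PROOFS =====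

-- descLen never runs past the end of arr (used by loopB's length lemma)
theorem descLen_lt (arr : List Int) (i : Nat) (h : 0 < descLen arr i) :
    i + descLen arr i < arr.length := by
  rw [descLen] at h ⊢
  split at h
  · rename_i hc
    split
    · by_cases h0 : 0 < descLen arr (i + 1)
      · have := descLen_lt arr (i + 1) h0
        omega
      · omega
    · omega
  · omega
termination_by arr.length - i
decreasing_by omega

-- length of the increasing run of arr ending at index i
def upF (arr : List Int) : Nat → Int
  | 0 => 1
  | i + 1 => if pvGet arr (i + 1) > pvGet arr i then upF arr i + 1 else 1

-- length of the decreasing run of arr starting at index i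
def downF (arr : List Int) (i : Nat) : Int :=
  if _h : i + 1 < arr.length ∧ pvGet arr i > pvGet arr (i + 1) then downF arr (i + 1) + 1 else 1
termination_by arr.length - i

theorem upF_pos (arr : List Int) (i : Nat) : 1 ≤ upF arr i := by
  cases i with
  | zero => simp [upF]
  | succ j =>
    unfold upF
    split
    · have := upF_pos arr j; omega
    · omega

theorem downF_eq (arr : List Int) (i : Nat) :
    downF arr i =
      if i + 1 < arr.length ∧ pvGet arr i > pvGet arr (i + 1) then downF arr (i + 1) + 1 else 1 := by
  rw [downF]
  exact dite_eq_ite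

theorem pvGet_set_self (xs : List Int) (i : Nat) (v : Int) (h : i < xs.length) :
    pvGet (xs.set i v) i = v := by
  simp [pvGet, List.getD_eq_getElem?_getD, h]

theorem pvGet_set_ne (xs : List Int) (i j : Nat) (v : Int) (h : i ≠ j) :
    pvGet (xs.set i v) j = pvGet xs j := by
  simp [pvGet, List.getD_eq_getElem?_getD, List.getElem?_set_ne h]

theorem length_loop1A (arr : List Int) (b : List Int) (index : Nat) :
    (loop1A arr b index).length = b.length := by
  unfold loop1A
  split
  · rw [length_loop1A]
    split <;> simp
  · rfl
termination_by arr.length - index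
decreasing_by omega

theorem length_loop2A (arr : List Int) (b : List Int) (k : Nat) :
    (loop2A arr b k).length = b.length := by
  induction k generalizing b with
  | zero => rfl
  | succ m ih =>
    unfold loop2A
    rw [ih]
    split <;> simp

theorem loop1A_inv (arr : List Int) (index : Nat) (b : List Int)
    (h1 : 1 ≤ index) (hlen : b.length = arr.length)
    (hdone : ∀ j, j < index → j < arr.length → pvGet b j = upF arr j)
    (htodo : ∀ j, index ≤ j → j < arr.length → pvGet b j = 1) :
    ∀ j, j < arr.length → pvGet (loop1A arr b index) j = upF arr j := by
  unfold loop1A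
  split
  · rename_i hix
    refine loop1A_inv arr (index + 1) _ (by omega) ?_ ?_ ?_
    · split <;> simp [hlen]
    · intro j hj hjn
      by_cases hje : j = index
      · subst hje
        have hidx : j = (j - 1) + 1 := by omega
        have hup : upF arr j = if pvGet arr j > pvGet arr (j - 1) then upF arr (j - 1) + 1 else 1 := by
          conv_lhs => rw [hidx]
          rw [upF]
          rw [← hidx]
        rw [hup]
        split
        · rw [pvGet_set_self _ _ _ (by omega)]
          rw [hdone (j - 1) (by omega) (by omega)]
        · exact htodo j (by omega) hjn
      · have hjlt : j < index := by omega
        split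
        · rw [pvGet_set_ne _ _ _ _ (by omega)]
          exact hdone j hjlt hjn
        · exact hdone j hjlt hjn
    · intro j hj hjn
      have hji : j ≠ index := by omega
      split
      · rw [pvGet_set_ne _ _ _ _ (by omega)]
        exact htodo j (by omega) hjn
      · exact htodo j (by omega) hjn
  · rename_i hix
    intro j hjn
    exact hdone j (by omega) hjn
termination_by arr.length - index
decreasing_by omega

theorem downF_pos (arr : List Int) (i : Nat) : 1 ≤ downF arr i := by
  unfold downF
  split
  · have := downF_pos arr (i + 1)
    omega
  · omega
termination_by arr.length - i
decreasing_by omega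

theorem loop2A_inv (arr : List Int) (k : Nat) (b : List Int)
    (hk : k ≤ arr.length - 1) (hlen : b.length = arr.length)
    (hup : ∀ j, j < k → pvGet b j = upF arr j)
    (hdone : ∀ j, k ≤ j → j < arr.length → pvGet b j = max (upF arr j) (downF arr j)) :
    ∀ j, j < arr.length → pvGet (loop2A arr b k) j = max (upF arr j) (downF arr j) := by
  induction k generalizing b with
  | zero =>
    intro j hj
    exact hdone j (by omega) hj
  | succ m ih =>
    have hmn : m + 1 < arr.length := by omega
    unfold loop2A
    refine ih _ (by omega) ?_ ?_ ?_
    · split <;> simp [hlen]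
    · intro j hj
      have hjm : j ≠ m := by omega
      split
      · rw [pvGet_set_ne _ _ _ _ (by omega)]
        exact hup j (by omega)
      · exact hup j (by omega)
    · intro j hmj hjn
      by_cases hje : j = m
      · subst hje
        have hbj : pvGet b j = upF arr j := hup j (by omega)
        have hdj := downF_eq arr j
        split
        · rename_i hc
          rw [pvGet_set_self _ _ _ (by omega)]
          have hbj1 : pvGet b (j + 1) = max (upF arr (j + 1)) (downF arr (j + 1)) :=
            hdone (j + 1) (by omega) (by omega)
          have hup1 : upF arr (j + 1) = 1 := by
            rw [upF]
            have : ¬ (pvGet arr (j + 1) > pvGet arr j) := by omega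
            simp [this]
          have hd1 : 1 ≤ downF arr (j + 1) := downF_pos arr (j + 1)
          have hdj' : downF arr j = downF arr (j + 1) + 1 := by
            rw [hdj]; simp [hmn, hc]
          rw [hbj, hbj1, hup1, hdj']
          omega
        · rename_i hc
          have hdj' : downF arr j = 1 := by
            rw [hdj]
            have : ¬ (j + 1 < arr.length ∧ pvGet arr j > pvGet arr (j + 1)) := by
              intro hx; exact hc hx.2
            simp [this]
          rw [hbj, hdj']
          have := upF_pos arr j
          omega
      · have hjm : m + 1 ≤ j := by omega
        split
        · rw [pvGet_set_ne _ _ _ _ (by omega)]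
          exact hdone j hjm hjn
        · exact hdone j hjm hjn

theorem a_getD (arr : List Int) (i : Nat) (hi : i < arr.length) :
    (compute_bonuses arr).getD i 0 = max (upF arr i) (downF arr i) := by
  unfold compute_bonuses
  have hlen1 : (loop1A arr (List.replicate arr.length 1) 1).length = arr.length := by
    rw [length_loop1A]; simp
  have hup : ∀ j, j < arr.length →
      pvGet (loop1A arr (List.replicate arr.length 1) 1) j = upF arr j := by
    refine loop1A_inv arr 1 _ (by omega) (by simp) ?_ ?_
    · intro j hj hjn
      interval_cases j
      simp [pvGet, List.getD_eq_getElem?_getD, List.getElem?_eq_getElem (show 0 < (List.replicate arr.length (1:Int)).length by simpa using hjn), upF]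
    · intro j hj hjn
      simp [pvGet, List.getD_eq_getElem?_getD, List.getElem?_eq_getElem (show j < (List.replicate arr.length (1:Int)).length by simpa using hjn)]
  have := loop2A_inv arr (arr.length - 1) (loop1A arr (List.replicate arr.length 1) 1)
    (by omega) hlen1
    (fun j hj => hup j (by omega))
    ?_ i hi
  · exact this
  · intro j hj hjn
    have hje : j = arr.length - 1 := by omega
    subst hje
    have hdj : downF arr (arr.length - 1) = 1 := by
      rw [downF]
      have : ¬ (arr.length - 1 + 1 < arr.length ∧
          pvGet arr (arr.length - 1) > pvGet arr (arr.length - 1 + 1)) := by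
        intro hx; omega
      simp [this]
    rw [hup _ hjn, hdj]
    have := upF_pos arr (arr.length - 1)
    omega

-- ===== B-side lemmas =====

theorem descLen_step (arr : List Int) (m : Nat) (h : 0 < descLen arr m) :
    m + 1 < arr.length ∧ pvGet arr (m + 1) < pvGet arr m ∧
      descLen arr (m + 1) = descLen arr m - 1 := by
  have h' := h
  rw [descLen] at h'
  split at h'
  · rename_i hc
    have he : descLen arr m = descLen arr (m + 1) + 1 := by
      rw [descLen, dif_pos hc]
    exact ⟨hc.1, hc.2, by omega⟩
  · omega

theorem downF_descLen (arr : List Int) (i : Nat) :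
    downF arr i = (descLen arr i : Int) + 1 := by
  rw [downF, descLen]
  by_cases hc : i + 1 < arr.length ∧ pvGet arr (i + 1) < pvGet arr i
  · rw [dif_pos hc, dif_pos ⟨hc.1, hc.2⟩, downF_descLen arr (i + 1)]
    push_cast
    ring
  · rw [dif_neg hc, dif_neg (by intro hx; exact hc ⟨hx.1, hx.2⟩)]
    simp
termination_by arr.length - i
decreasing_by omega

-- inside the descent after i: strict decrease at each step, and remaining descent length
theorem descent_facts (arr : List Int) (i : Nat) :
    ∀ t, t < descLen arr i →
      pvGet arr (i + t + 1) < pvGet arr (i + t) ∧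
        descLen arr (i + t + 1) = descLen arr i - t - 1 := by
  intro t
  induction t with
  | zero =>
    intro ht
    have := descLen_step arr i ht
    exact ⟨by simpa using this.2.1, by simpa using this.2.2⟩
  | succ m ih =>
    intro ht
    have hprev := ih (by omega)
    have hpos : 0 < descLen arr (i + m + 1) := by omega
    have := descLen_step arr (i + m + 1) hpos
    constructor
    · have := this.2.1
      have harith : i + (m + 1) + 1 = i + m + 1 + 1 := by omega
      have harith2 : i + (m + 1) = i + m + 1 := by omega
      rw [harith, harith2]
      exact this
    · have h2 := this.2.2
      have harith : i + (m + 1) + 1 = i + m + 1 + 1 := by omega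
      rw [harith, h2, hprev.2]
      omega

theorem downList_length (d : Nat) : (downList d).length = d := by
  induction d with
  | zero => rfl
  | succ k ih => simp [downList, ih]

theorem downList_getD (d t : Nat) (ht : t < d) :
    (downList d).getD t 0 = (d : Int) - t := by
  induction d generalizing t with
  | zero => omega
  | succ k ih =>
    cases t with
    | zero => simp [downList]
    | succ m =>
      have := ih m (by omega)
      simp only [downList, List.getD_cons_succ]
      rw [this]
      push_cast
      ring

theorem loopB_length (arr : List Int) (i : Nat) (up : Int) :
    (loopB arr i up).length = arr.length - i := by
  rw [loopB]
  split
  · rename_i hi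
    split
    · rename_i hd
      have hlt := descLen_lt arr i hd
      rw [List.length_cons, List.length_append, downList_length,
        loopB_length arr (i + descLen arr i + 1) 1]
      omega
    · rw [List.length_cons, loopB_length arr (i + 1) _]
      omega
  · rename_i hi
    simp
    omega
termination_by arr.length - i
decreasing_by all_goals omega

theorem loopB_getD (arr : List Int) (i : Nat) (up : Int) (j : Nat)
    (hinv : (i = 0 ∧ up = 1) ∨ (0 < i ∧ up = upF arr (i - 1)))
    (hj : i + j < arr.length) :
    (loopB arr i up).getD j 0 = max (upF arr (i + j)) (downF arr (i + j)) := by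
  have hi : i < arr.length := by omega
  rw [loopB]
  simp only [dif_pos hi]
  have hup' : upStep arr i up = upF arr i := by
    rcases hinv with ⟨h0, hu⟩ | ⟨h0, hu⟩
    · subst h0; simp [upStep, hu, upF]
    · have hidx : i = (i - 1) + 1 := by omega
      have : upF arr i = if pvGet arr i > pvGet arr (i - 1) then upF arr (i - 1) + 1 else 1 := by
        conv_lhs => rw [hidx]
        rw [upF]
        rw [← hidx]
      simp only [upStep, if_pos h0, this, hu]
  rw [hup']
  split
  · -- descent of length d > 0 after i
    rename_i hd
    set d := descLen arr i with hdd
    have hlt : i + d < arr.length := descLen_lt arr i hd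
    cases j with
    | zero =>
      simp only [List.getD_cons_zero]
      rw [show i + 0 = i from rfl, downF_descLen arr i, ← hdd]
    | succ t =>
      simp only [List.getD_cons_succ]
      by_cases htd : t < d
      · -- inside the descent: value from downList
        have hget : (downList d ++ loopB arr (i + d + 1) 1).getD t 0 = (downList d).getD t 0 := by
          rw [List.getD_eq_getElem?_getD, List.getD_eq_getElem?_getD,
            List.getElem?_append_left (by rw [downList_length]; omega)]
        rw [hget, downList_getD d t htd]
        have hf := descent_facts arr i t htd
        have hupv : upF arr (i + t + 1) = 1 := by
          rw [upF]
          have : ¬ (pvGet arr (i + t + 1) > pvGet arr (i + t)) := by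
            have := hf.1; omega
          simp [this]
        have hdownv : downF arr (i + t + 1) = (d : Int) - t := by
          rw [downF_descLen, hf.2]
          omega
        have harith : i + (t + 1) = i + t + 1 := by omega
        rw [harith, hupv, hdownv]
        omega
      · -- past the descent: recurse
        have hget : (downList d ++ loopB arr (i + d + 1) 1).getD t 0
            = (loopB arr (i + d + 1) 1).getD (t - d) 0 := by
          rw [List.getD_eq_getElem?_getD, List.getD_eq_getElem?_getD,
            List.getElem?_append_right (by rw [downList_length]; omega), downList_length]
        rw [hget]
        have hf := descent_facts arr i (d - 1) (by omega)
        have hlt2 : pvGet arr (i + d) < pvGet arr (i + (d - 1)) := by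
          have := hf.1
          rw [show i + (d - 1) + 1 = i + d by omega] at this
          exact this
        have hupd : upF arr (i + d) = 1 := by
          rw [show i + d = (i + (d - 1)) + 1 by omega, upF,
            show i + (d - 1) + 1 = i + d by omega]
          have hng : ¬ (pvGet arr (i + d) > pvGet arr (i + (d - 1))) := by omega
          simp [hng]
        have hup1 : (1 : Int) = upF arr (i + d + 1 - 1) := by
          rw [show i + d + 1 - 1 = i + d by omega, hupd]
        have := loopB_getD arr (i + d + 1) 1 (t - d) (Or.inr ⟨by omega, hup1⟩) (by omega)
        rw [this]
        congr 2 <;> omega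
  · -- no descent after i
    rename_i hd
    cases j with
    | zero =>
      simp only [List.getD_cons_zero]
      have hdown1 : downF arr (i + 0) = 1 := by
        rw [show i + 0 = i from rfl, downF_descLen]
        omega
      rw [hdown1, show i + 0 = i from rfl]
      have := upF_pos arr i
      omega
    | succ t =>
      simp only [List.getD_cons_succ]
      have := loopB_getD arr (i + 1) (upF arr i) t
        (Or.inr ⟨by omega, by simp⟩) (by omega)
      rw [this]
      congr 2 <;> omega
termination_by arr.length - i
decreasing_by all_goals omega

-- ===== VERDICT (by name: the statement is the Claim_ definition above) =====
theorem compute_bonuses_spec : Claim_equal_compute_bonuses := by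
  intro arr _
  unfold Spec_compute_bonuses
  have hlenA : (compute_bonuses arr).length = arr.length := by
    unfold compute_bonuses
    rw [length_loop2A, length_loop1A]; simp
  have hlenB : (compute_bonuses_alt arr).length = arr.length := by
    unfold compute_bonuses_alt
    rw [loopB_length]; omega
  apply List.ext_getElem (by omega)
  intro i hiA hiB
  have hi : i < arr.length := by omega
  have h1 : (compute_bonuses arr)[i]'hiA = (compute_bonuses arr).getD i 0 := by
    simp [List.getD_eq_getElem?_getD, List.getElem?_eq_getElem hiA]
  have h2 : (compute_bonuses_alt arr)[i]'hiB = (compute_bonuses_alt arr).getD i 0 := by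
    simp [List.getD_eq_getElem?_getD, List.getElem?_eq_getElem hiB]
  rw [h1, h2, a_getD arr i hi]
  unfold compute_bonuses_alt
  rw [loopB_getD arr 0 1 i (Or.inl ⟨rfl, rfl⟩) (by omega)]
  simp
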